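-- pv_equiv track=rewrite | github.com/juanmaverde/SurgicalVision3D-Planner | app/SurgicalVision3D_Planner/SurgicalVision3D_Planner.py | aggregateProbeCoordinationFailures
-- ===== SOURCE A (Python) =====
-- from typing import Any, Sequence
--
-- def aggregateProbeCoordinationFailures(pairRows: Sequence[dict[str, float | int | bool | str]]) -> str:
--     failureNames: set[str] = set()
--     for row in pairRows:
--         rowFailures = str(row.get("FailedConstraintNames", ""))
--         for name in rowFailures.split(";"):
--             cleaned = name.strip()
--             if cleaned:
--                 failureNames.add(cleaned)
--     return ";".join(sorted(failureNames))
-- ===== SOURCE B (Python) =====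
-- from typing import Any, Sequence
--
-- def aggregateProbeCoordinationFailures(pairRows: Sequence[dict]) -> str:
--     tokens: list[str] = []
--     for row in pairRows:
--         for name in str(row.get("FailedConstraintNames", "")).split(";"):
--             cleaned = name.strip()
--             if cleaned:
--                 tokens.append(cleaned)
--     tokens.sort()
--     parts: list[str] = []
--     prev = None
--     for t in tokens:
--         if t != prev:
--             parts.append(t)
--             prev = t
--     return ";".join(parts)
-- ===== Notes on version B (the rewrite author's own statement) =====
-- stated objective: alternative
-- what changed: B collects all cleaned non-empty tokens into a plain list (duplicates kept), sorts it, and dedups by a single adjacency pass over the sorted list, replacing A's hash-set membership mechanism entirely.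
import Mathlib
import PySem

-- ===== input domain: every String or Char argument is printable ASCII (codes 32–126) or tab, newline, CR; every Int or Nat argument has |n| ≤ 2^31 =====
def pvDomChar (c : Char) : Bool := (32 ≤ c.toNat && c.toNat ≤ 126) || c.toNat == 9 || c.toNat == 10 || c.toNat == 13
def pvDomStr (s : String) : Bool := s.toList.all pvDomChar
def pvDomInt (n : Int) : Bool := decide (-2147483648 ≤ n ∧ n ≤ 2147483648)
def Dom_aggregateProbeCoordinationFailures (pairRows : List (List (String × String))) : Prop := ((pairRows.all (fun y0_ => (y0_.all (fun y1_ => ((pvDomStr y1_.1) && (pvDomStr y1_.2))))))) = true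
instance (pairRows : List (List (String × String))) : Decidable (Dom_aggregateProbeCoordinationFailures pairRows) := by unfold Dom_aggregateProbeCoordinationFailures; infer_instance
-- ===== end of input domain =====

-- B replaces A's hash-set accumulation by collect-all-tokens, sort, then a single
-- adjacency-dedup pass; same return value, no speed claim.

-- ===== PORT A =====
-- s.split(";") never raises for the non-empty separator ";", so split? is some here and getD [] is exact.
def aggregateProbeCoordinationFailures (pairRows : List (List (String × String))) : String :=
  let failureNames : PySem.Set String :=
    pairRows.foldl (fun s row =>
      ((PySem.Str.split? (PySem.Dict.getD (PySem.Dict.mk row) "FailedConstraintNames" "") ";").getD []).foldl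
        (fun s name =>
          let cleaned := PySem.Str.strip name
          if cleaned ≠ "" then PySem.Set.add s cleaned else s) s)
      PySem.Set.empty
  PySem.Str.join ";" (PySem.List.sorted failureNames (fun x => x) false)

-- ===== PORT B =====
def aggregateProbeCoordinationFailures_alt (pairRows : List (List (String × String))) : String :=
  let tokens : List String :=
    pairRows.foldl (fun acc row =>
      ((PySem.Str.split? (PySem.Dict.getD (PySem.Dict.mk row) "FailedConstraintNames" "") ";").getD []).foldl
        (fun acc name =>
          let cleaned := PySem.Str.strip name
          if cleaned ≠ "" then acc ++ [cleaned] else acc) acc)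
      []
  let sortedTokens := PySem.List.sorted tokens (fun x => x) false
  let st : Option String × List String :=
    sortedTokens.foldl (fun st t => if some t = st.1 then st else (some t, st.2 ++ [t])) (none, [])
  PySem.Str.join ";" st.2

-- ===== PRECONDITION & SPEC =====
def Spec_aggregateProbeCoordinationFailures (pairRows : List (List (String × String))) (out : String) : Prop := out = aggregateProbeCoordinationFailures_alt pairRows
instance (pairRows : List (List (String × String))) (out : String) : Decidable (Spec_aggregateProbeCoordinationFailures pairRows out) := by unfold Spec_aggregateProbeCoordinationFailures; infer_instance

-- ===== CLAIM (what is proved, stated in full; the proofs are below) =====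
def Claim_equal_aggregateProbeCoordinationFailures : Prop := ∀ (pairRows : List (List (String × String))), Dom_aggregateProbeCoordinationFailures pairRows → Spec_aggregateProbeCoordinationFailures pairRows (aggregateProbeCoordinationFailures pairRows)

-- ===== LEMMAS AND PROOFS =====

-- the cleaned non-empty tokens contributed by one row
def pvRowToks (row : List (String × String)) : List String :=
  (((PySem.Str.split? (PySem.Dict.getD (PySem.Dict.mk row) "FailedConstraintNames" "") ";").getD []).map
    PySem.Str.strip).filter (· ≠ "")

def pvToks (pairRows : List (List (String × String))) : List String :=
  pairRows.flatMap pvRowToks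

-- adjacency dedup, structural form of B's last loop
def pvDedupGo (prev : String) : List String → List String
  | [] => []
  | t :: ts => if t = prev then pvDedupGo prev ts else t :: pvDedupGo t ts

-- A's inner loop over one row's split is a Set.update by the cleaned non-empty tokens
lemma pvA_inner (l : List String) (s : PySem.Set String) :
    l.foldl (fun s name =>
      if PySem.Str.strip name ≠ "" then PySem.Set.add s (PySem.Str.strip name) else s) s
    = PySem.Set.update s ((l.map PySem.Str.strip).filter (· ≠ "")) := by
  induction l generalizing s with
  | nil => rfl
  | cons t ts ih =>
    rw [List.foldl_cons]
    show List.foldl _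
      (if PySem.Str.strip t ≠ "" then PySem.Set.add s (PySem.Str.strip t) else s) ts = _
    by_cases h : PySem.Str.strip t = ""
    · rw [if_neg (not_not_intro h), ih, List.map_cons, List.filter_cons,
        if_neg (by simp [h])]
    · rw [if_pos h, ih, List.map_cons, List.filter_cons, if_pos (by simpa using h)]
      rfl

-- folding Set.update row by row is one Set.update by the concatenation
lemma pvUpdate_fold (rows : List (List (String × String))) (s : PySem.Set String) :
    rows.foldl (fun s row => PySem.Set.update s (pvRowToks row)) s
    = PySem.Set.update s (pvToks rows) := by
  induction rows generalizing s with
  | nil => rfl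
  | cons r rs ih =>
    rw [List.foldl_cons]
    show List.foldl _ (PySem.Set.update s (pvRowToks r)) rs = _
    rw [ih]
    simp only [pvToks, List.flatMap_cons]
    simp [PySem.Set.update, List.foldl_append]

-- A's outer loop builds the set of all tokens
lemma pvA_outer (rows : List (List (String × String))) (s : PySem.Set String) :
    rows.foldl (fun s row =>
      ((PySem.Str.split? (PySem.Dict.getD (PySem.Dict.mk row) "FailedConstraintNames" "") ";").getD []).foldl
        (fun s name =>
          if PySem.Str.strip name ≠ "" then PySem.Set.add s (PySem.Str.strip name) else s) s) s
    = PySem.Set.update s (pvToks rows) := by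
  have h1 : rows.foldl (fun s row =>
      ((PySem.Str.split? (PySem.Dict.getD (PySem.Dict.mk row) "FailedConstraintNames" "") ";").getD []).foldl
        (fun s name =>
          if PySem.Str.strip name ≠ "" then PySem.Set.add s (PySem.Str.strip name) else s) s) s
      = rows.foldl (fun s row => PySem.Set.update s (pvRowToks row)) s :=
    PySem.List.foldl_congr_mem' rows _ _ s (fun row _ acc => pvA_inner _ acc)
  rw [h1]
  exact pvUpdate_fold rows s

-- B's inner loop appends one row's cleaned non-empty tokens
lemma pvB_inner (l : List String) (acc : List String) :
    l.foldl (fun acc name =>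
      if PySem.Str.strip name ≠ "" then acc ++ [PySem.Str.strip name] else acc) acc
    = acc ++ ((l.map PySem.Str.strip).filter (· ≠ "")) := by
  induction l generalizing acc with
  | nil => simp
  | cons t ts ih =>
    rw [List.foldl_cons]
    show List.foldl _
      (if PySem.Str.strip t ≠ "" then acc ++ [PySem.Str.strip t] else acc) ts = _
    by_cases h : PySem.Str.strip t = ""
    · rw [if_neg (not_not_intro h), ih, List.map_cons, List.filter_cons,
        if_neg (by simp [h])]
    · rw [if_pos h, ih, List.map_cons, List.filter_cons, if_pos (by simpa using h)]
      simp

-- B's outer loop collects all tokens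
lemma pvB_outer (rows : List (List (String × String))) (acc : List String) :
    rows.foldl (fun acc row =>
      ((PySem.Str.split? (PySem.Dict.getD (PySem.Dict.mk row) "FailedConstraintNames" "") ";").getD []).foldl
        (fun acc name =>
          if PySem.Str.strip name ≠ "" then acc ++ [PySem.Str.strip name] else acc) acc) acc
    = acc ++ pvToks rows := by
  have h1 : rows.foldl (fun acc row =>
      ((PySem.Str.split? (PySem.Dict.getD (PySem.Dict.mk row) "FailedConstraintNames" "") ";").getD []).foldl
        (fun acc name =>
          if PySem.Str.strip name ≠ "" then acc ++ [PySem.Str.strip name] else acc) acc) acc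
      = rows.foldl (fun acc row => acc ++ pvRowToks row) acc :=
    PySem.List.foldl_congr_mem' rows _ _ acc (fun row _ acc => pvB_inner _ acc)
  rw [h1]
  exact PySem.List.foldl_append_eq_flatMap pvRowToks rows acc

-- B's dedup fold, once a previous token exists, is pvDedupGo
lemma pvDedup_fold (l : List String) (prev : String) (out : List String) :
    l.foldl (fun (st : Option String × List String) t =>
        if some t = st.1 then st else (some t, st.2 ++ [t])) (some prev, out)
    = (some (l.getLastD prev), out ++ pvDedupGo prev l) := by
  induction l generalizing prev out with
  | nil => simp [pvDedupGo]
  | cons t ts ih =>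
    rw [List.foldl_cons]
    show List.foldl _
      (if some t = some prev then ((some prev : Option String), out) else (some t, out ++ [t])) ts = _
    by_cases h : t = prev
    · subst h
      rw [if_pos rfl, ih, List.getLastD_cons,
        show pvDedupGo t (t :: ts) = pvDedupGo t ts from by simp [pvDedupGo]]
    · rw [if_neg (by simp [h]), ih, List.getLastD_cons,
        show pvDedupGo prev (t :: ts) = t :: pvDedupGo t ts from by simp [pvDedupGo, h],
        List.append_assoc, List.singleton_append]

-- B's dedup fold from the initial (None, []) state
lemma pvDedupAdj_fold (l : List String) :
    (l.foldl (fun (st : Option String × List String) t =>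
        if some t = st.1 then st else (some t, st.2 ++ [t])) (none, [])).2
    = (match l with
       | [] => []
       | m :: rest => m :: pvDedupGo m rest) := by
  cases l with
  | nil => rfl
  | cons m rest =>
    rw [List.foldl_cons]
    show (List.foldl _
      (if some m = (none : Option String) then ((none : Option String), ([] : List String))
       else (some m, [] ++ [m])) rest).2 = _
    rw [if_neg (by simp), List.nil_append, pvDedup_fold]
    rfl

-- on a ≤-sorted tail after prev, adjacency dedup is <-sorted with the same members
lemma pvDedup_spec (l : List String) (prev : String)
    (h : (prev :: l).Pairwise (· ≤ ·)) :
    (prev :: pvDedupGo prev l).Pairwise (· < ·) ∧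
    (∀ x, x ∈ prev :: pvDedupGo prev l ↔ x ∈ prev :: l) := by
  induction l generalizing prev with
  | nil => simp [pvDedupGo]
  | cons t ts ih =>
    rcases List.pairwise_cons.mp h with ⟨hprev, htail⟩
    by_cases ht : t = prev
    · subst ht
      obtain ⟨hp, hm⟩ := ih t htail
      refine ⟨?_, ?_⟩
      · simpa [pvDedupGo] using hp
      · intro x
        simp only [pvDedupGo, if_pos]
        have := hm x
        simp only [List.mem_cons] at this ⊢
        tauto
    · have hle : prev ≤ t := hprev t (by simp)
      have hlt : prev < t := lt_of_le_of_ne hle (fun e => ht e.symm)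
      obtain ⟨hp, hm⟩ := ih t htail
      refine ⟨?_, ?_⟩
      · simp only [pvDedupGo, if_neg ht]
        refine List.pairwise_cons.mpr ⟨?_, hp⟩
        intro y hy
        rcases List.mem_cons.mp hy with h1 | h2
        · subst h1; exact hlt
        · exact lt_trans hlt ((List.pairwise_cons.mp hp).1 y h2)
      · intro x
        simp only [pvDedupGo, if_neg ht, List.mem_cons]
        have := hm x
        simp only [List.mem_cons] at this
        tauto

-- the sorted distinct set equals adjacency-dedup of the sorted full list
lemma pvSorted_set_eq (toks : List String) :
    PySem.List.sorted (PySem.Set.ofList toks) (fun x => x) false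
    = (match PySem.List.sorted toks (fun x => x) false with
       | [] => []
       | m :: rest => m :: pvDedupGo m rest) := by
  cases hs : PySem.List.sorted toks (fun x => x) false with
  | nil =>
    have : toks = [] := (PySem.List.sorted_eq_nil_iff toks (fun x => x) false).mp hs
    subst this
    rfl
  | cons m rest =>
    have hpw : (m :: rest).Pairwise (· ≤ ·) := by
      have := PySem.List.sorted_pairwise toks (fun x => x)
      rw [hs] at this
      exact this
    obtain ⟨hlt, hmem⟩ := pvDedup_spec rest m hpw
    have hnd : (m :: pvDedupGo m rest).Nodup := hlt.imp (fun h => ne_of_lt h)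
    have hperm : (m :: pvDedupGo m rest).Perm (PySem.Set.ofList toks) := by
      rw [List.perm_ext_iff_of_nodup hnd (PySem.Set.nodup_ofList toks)]
      intro x
      rw [hmem x, ← hs, PySem.List.mem_sorted, PySem.Set.mem_ofList]
    exact PySem.List.sorted_eq_of_perm_of_pairwise_lt _ _ _ hperm hlt

-- ===== VERDICT (by name: the statement is the Claim_ definition above) =====
theorem aggregateProbeCoordinationFailures_spec : Claim_equal_aggregateProbeCoordinationFailures := by
  intro pairRows _
  unfold Spec_aggregateProbeCoordinationFailures
  simp only [aggregateProbeCoordinationFailures, aggregateProbeCoordinationFailures_alt]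
  rw [pvA_outer, pvB_outer, List.nil_append,
    show PySem.Set.update PySem.Set.empty (pvToks pairRows)
      = PySem.Set.ofList (pvToks pairRows) from rfl,
    pvSorted_set_eq, pvDedupAdj_fold]
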